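-- pv_equiv track=rewrite | github.com/artkpv/code-dojo | yandex.ru/2024_yandex_cup/B/pr.py | num_hills
-- ===== SOURCE A (Python) =====
-- def num_hills(arr):
--     ans = 0
--     n = len(arr)
--     i = 0
--     while i < n:
--         j = i
--         while j + 1 < n and arr[j] < arr[j + 1]:
--             j += 1
--         if j == i:
--             i += 1
--         else:
--             # potential hill
--             k = j
--             while k + 1 < n and arr[k] > arr[k + 1]:
--                 k += 1
--             if j < k:
--                 # hill
--                 ans += (j - i) * (k - j)
--             i = k
--     return ans
-- ===== SOURCE B (Python) =====
-- def _ups(arr):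
--     # ups[i] = length of the strictly increasing run ending at i
--     if not arr:
--         return []
--     res = [0]
--     for prev, x in zip(arr, arr[1:]):
--         res.append(res[-1] + 1 if prev < x else 0)
--     return res
--
--
-- def _downs(arr):
--     # downs[i] = length of the strictly decreasing run starting at i,
--     # built back-to-front over the reversed array
--     if not arr:
--         return []
--     res = [0]
--     rev = arr[::-1]
--     for nxt, x in zip(rev, rev[1:]):
--         res.append(res[-1] + 1 if x > nxt else 0)
--     return res[::-1]
--
--
-- def num_hills(arr):
--     ups = _ups(arr)
--     downs = _downs(arr)
--     return sum(u * d for u, d in zip(ups, downs))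
-- ===== Notes on version B (the rewrite author's own statement) =====
-- stated objective: alternative
-- what changed: Replaced the index-jumping while-loop scan (find each maximal ascent, then its descent, add product of the two run lengths) by two independent run-length arrays up[i]/down[i] built in separate linear passes plus a final sum of up[i]*down[i] over all indices.
import Mathlib
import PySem

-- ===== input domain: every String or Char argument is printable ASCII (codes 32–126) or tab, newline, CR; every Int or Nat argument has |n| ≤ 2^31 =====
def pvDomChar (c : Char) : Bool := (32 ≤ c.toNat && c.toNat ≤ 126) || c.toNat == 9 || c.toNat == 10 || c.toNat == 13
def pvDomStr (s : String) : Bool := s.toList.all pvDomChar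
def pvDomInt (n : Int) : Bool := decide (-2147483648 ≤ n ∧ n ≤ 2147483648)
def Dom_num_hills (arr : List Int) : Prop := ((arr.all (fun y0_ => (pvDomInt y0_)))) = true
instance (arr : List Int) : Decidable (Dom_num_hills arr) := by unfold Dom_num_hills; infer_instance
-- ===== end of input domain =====

-- B replaces A's index-jumping scan (maximal ascent, then its descent, add product of run
-- lengths) by two run-length arrays up[i]/down[i] built in separate passes plus one sum.

-- ===== PORT A =====
-- inner loop `while j + 1 < n and arr[j] < arr[j + 1]: j += 1` (arr[j] is in range when read)
def aIncEnd (arr : List Int) (j : Nat) : Nat :=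
  if h : j + 1 < arr.length ∧ arr.getD j 0 < arr.getD (j + 1) 0 then aIncEnd arr (j + 1) else j
termination_by arr.length - j
decreasing_by omega

-- inner loop `while k + 1 < n and arr[k] > arr[k + 1]: k += 1`
def aDecEnd (arr : List Int) (k : Nat) : Nat :=
  if h : k + 1 < arr.length ∧ arr.getD k 0 > arr.getD (k + 1) 0 then aDecEnd arr (k + 1) else k
termination_by arr.length - k
decreasing_by omega

-- needed by aLoop's termination
theorem aIncEnd_ge (arr : List Int) (j : Nat) : j ≤ aIncEnd arr j := by
  fun_induction aIncEnd arr j with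
  | case1 j h ih => omega
  | case2 j h => omega

theorem aDecEnd_ge (arr : List Int) (k : Nat) : k ≤ aDecEnd arr k := by
  fun_induction aDecEnd arr k with
  | case1 k h ih => omega
  | case2 k h => omega

-- outer `while i < n` loop; the Python locals j, k appear as the aIncEnd/aDecEnd calls
def aLoop (arr : List Int) (i : Nat) (ans : Int) : Int :=
  if hi : i < arr.length then
    if hj : aIncEnd arr i = i then aLoop arr (i + 1) ans
    else
      aLoop arr (aDecEnd arr (aIncEnd arr i))
        (if aIncEnd arr i < aDecEnd arr (aIncEnd arr i) then
           ans + ((aIncEnd arr i : Int) - (i : Int)) *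
                 ((aDecEnd arr (aIncEnd arr i) : Int) - (aIncEnd arr i : Int))
         else ans)
  else ans
termination_by arr.length - i
decreasing_by
  all_goals
    (have h1 := aIncEnd_ge arr i; have h2 := aDecEnd_ge arr (aIncEnd arr i); omega)

def num_hills (arr : List Int) : Int := aLoop arr 0 0

-- ===== PORT B =====
-- _ups: `res = [0]; for prev, x in zip(arr, arr[1:]): res.append(res[-1]+1 if prev < x else 0)`
-- (acc holds res reversed; cur = res[-1])
def bUpsGo (cur : Int) (acc : List Int) (prev : Int) : List Int → List Int
  | [] => acc.reverse
  | x :: rest =>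
    let c := if prev < x then cur + 1 else 0
    bUpsGo c (c :: acc) x rest

def bUps : List Int → List Int
  | [] => []
  | x :: xs => bUpsGo 0 [0] x xs

-- _downs: same loop over the reversed array; the Python's final res[::-1] is the
-- prepend-accumulated acc itself
def bDownGo (cur : Int) (acc : List Int) (nxt : Int) : List Int → List Int
  | [] => acc
  | x :: rest =>
    let c := if x > nxt then cur + 1 else 0
    bDownGo c (c :: acc) x rest

def bDownRev : List Int → List Int
  | [] => []
  | y :: ys => bDownGo 0 [0] y ys

def bDown (arr : List Int) : List Int := bDownRev arr.reverse

def num_hills_alt (arr : List Int) : Int :=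
  (List.zipWith (· * ·) (bUps arr) (bDown arr)).sum

-- ===== PRECONDITION & SPEC =====
def Spec_num_hills (arr : List Int) (out : Int) : Prop := out = num_hills_alt arr
instance (arr : List Int) (out : Int) : Decidable (Spec_num_hills arr out) := by unfold Spec_num_hills; infer_instance

-- ===== CLAIM (what is proved, stated in full; the proofs are below) =====
def Claim_equal_num_hills : Prop := ∀ (arr : List Int), Dom_num_hills arr → Spec_num_hills arr (num_hills arr)

-- ===== LEMMAS AND PROOFS =====

-- uF arr p = length of the strictly increasing run ending at p
def uF (arr : List Int) : Nat → Int
  | 0 => 0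
  | p + 1 => if p + 1 < arr.length ∧ arr.getD p 0 < arr.getD (p + 1) 0 then uF arr p + 1 else 0

-- dF arr p = length of the strictly decreasing run starting at p
def dF (arr : List Int) (p : Nat) : Int :=
  if h : p + 1 < arr.length ∧ arr.getD p 0 > arr.getD (p + 1) 0 then dF arr (p + 1) + 1 else 0
termination_by arr.length - p
decreasing_by omega

theorem aIncEnd_lt (arr : List Int) (j : Nat) (h : j < arr.length) :
    aIncEnd arr j < arr.length := by
  fun_induction aIncEnd arr j with
  | case1 j h' ih => exact ih (by omega)
  | case2 j h' => exact h

theorem aDecEnd_lt (arr : List Int) (k : Nat) (h : k < arr.length) :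
    aDecEnd arr k < arr.length := by
  fun_induction aDecEnd arr k with
  | case1 k h' ih => exact ih (by omega)
  | case2 k h' => exact h

theorem aIncEnd_stop (arr : List Int) (j : Nat) :
    ¬(aIncEnd arr j + 1 < arr.length ∧ arr.getD (aIncEnd arr j) 0 < arr.getD (aIncEnd arr j + 1) 0) := by
  fun_induction aIncEnd arr j with
  | case1 j h' ih => exact ih
  | case2 j h' => exact h'

theorem aDecEnd_stop (arr : List Int) (k : Nat) :
    ¬(aDecEnd arr k + 1 < arr.length ∧ arr.getD (aDecEnd arr k) 0 > arr.getD (aDecEnd arr k + 1) 0) := by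
  fun_induction aDecEnd arr k with
  | case1 k h' ih => exact ih
  | case2 k h' => exact h'

theorem aIncEnd_step (arr : List Int) (j p : Nat) (h1 : j ≤ p) (h2 : p < aIncEnd arr j) :
    p + 1 < arr.length ∧ arr.getD p 0 < arr.getD (p + 1) 0 := by
  fun_induction aIncEnd arr j with
  | case1 j h' ih =>
    rcases Nat.eq_or_lt_of_le h1 with rfl | hlt
    · exact h'
    · exact ih hlt h2
  | case2 j h' => omega

theorem aDecEnd_step (arr : List Int) (k p : Nat) (h1 : k ≤ p) (h2 : p < aDecEnd arr k) :
    p + 1 < arr.length ∧ arr.getD p 0 > arr.getD (p + 1) 0 := by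
  fun_induction aDecEnd arr k with
  | case1 k h' ih =>
    rcases Nat.eq_or_lt_of_le h1 with rfl | hlt
    · exact h'
    · exact ih hlt h2
  | case2 k h' => omega

theorem dF_eq (arr : List Int) (p : Nat) : dF arr p = (aDecEnd arr p : Int) - (p : Int) := by
  fun_induction dF arr p with
  | case1 p h ih =>
    rw [aDecEnd, dif_pos h, ih]
    push_cast; ring
  | case2 p h =>
    rw [aDecEnd, dif_neg h]
    ring

theorem uF_run (arr : List Int) (i : Nat) (h0 : uF arr i = 0) :
    ∀ t, i + t ≤ aIncEnd arr i → uF arr (i + t) = (t : Int) := by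
  intro t
  induction t with
  | zero => intro _; simpa using h0
  | succ t ih =>
    intro ht
    have hstep := aIncEnd_step arr i (i + t) (by omega) (by omega)
    have hih := ih (by omega)
    show uF arr ((i + t) + 1) = _
    simp only [uF]
    rw [if_pos hstep, hih]
    push_cast; ring

theorem range'_split (s k n : Nat) (h1 : s ≤ k) (h2 : k ≤ n) :
    List.range' s (n - s) = List.range' s (k - s) ++ List.range' k (n - k) := by
  rw [show n - s = (k - s) + (n - k) from by omega, ← List.range'_append (step := 1),
    show s + 1 * (k - s) = k from by omega]

theorem sum_zero_of_all {f : Nat → Int} {s n : Nat} (h : ∀ p, s ≤ p → p < s + n → f p = 0) :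
    ((List.range' s n).map f).sum = 0 := by
  apply List.sum_eq_zero
  intro x hx
  simp only [List.mem_map] at hx
  obtain ⟨p, hp, rfl⟩ := hx
  rw [List.mem_range'_1] at hp
  exact h p hp.1 hp.2

theorem uF_zero_of_gt (arr : List Int) (q : Nat)
    (h : arr.getD q 0 > arr.getD (q + 1) 0) : uF arr (q + 1) = 0 := by
  simp only [uF]
  rw [if_neg (fun hc => absurd hc.2 (by omega))]

theorem main_loop (arr : List Int) (m : Nat) : ∀ (i : Nat) (ans : Int), arr.length - i ≤ m →
    (uF arr i = 0 ∨
      (¬(i + 1 < arr.length ∧ arr.getD i 0 < arr.getD (i + 1) 0) ∧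
       ¬(i + 1 < arr.length ∧ arr.getD i 0 > arr.getD (i + 1) 0))) →
    aLoop arr i ans =
      ans + ((List.range' i (arr.length - i)).map (fun p => uF arr p * dF arr p)).sum := by
  induction m with
  | zero =>
    intro i ans hm _
    rw [aLoop, dif_neg (by omega)]
    rw [show arr.length - i = 0 from by omega]
    simp
  | succ m ih =>
    intro i ans hm hinv
    by_cases hi : i < arr.length
    · rw [aLoop, dif_pos hi]
      by_cases hj : aIncEnd arr i = i
      · rw [dif_pos hj]
        have hstop := aIncEnd_stop arr i
        rw [hj] at hstop
        have hnext : uF arr (i + 1) = 0 := by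
          simp only [uF]; rw [if_neg hstop]
        rw [ih (i + 1) ans (by omega) (Or.inl hnext)]
        have hfi : uF arr i * dF arr i = 0 := by
          rcases hinv with h0 | ⟨_, hnd⟩
          · rw [h0]; ring
          · rw [dF, dif_neg hnd]; ring
        rw [show arr.length - i = (arr.length - (i + 1)) + 1 from by omega,
          List.range'_succ, List.map_cons, List.sum_cons, hfi]
        ring
      · rw [dif_neg hj]
        have hij : i ≤ aIncEnd arr i := aIncEnd_ge arr i
        have hijlt : i < aIncEnd arr i := lt_of_le_of_ne hij (Ne.symm hj)
        have hjk : aIncEnd arr i ≤ aDecEnd arr (aIncEnd arr i) := aDecEnd_ge arr _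
        have hjn : aIncEnd arr i < arr.length := aIncEnd_lt arr i hi
        have hkn : aDecEnd arr (aIncEnd arr i) < arr.length := aDecEnd_lt arr _ hjn
        set j := aIncEnd arr i with hjdef
        set k := aDecEnd arr j with hkdef
        have hui : uF arr i = 0 := by
          rcases hinv with h0 | ⟨hni, _⟩
          · exact h0
          · exact absurd (by rw [hjdef, aIncEnd, dif_neg hni]) hj
        have hinvk : uF arr k = 0 ∨
            (¬(k + 1 < arr.length ∧ arr.getD k 0 < arr.getD (k + 1) 0) ∧
             ¬(k + 1 < arr.length ∧ arr.getD k 0 > arr.getD (k + 1) 0)) := by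
          rcases Nat.eq_or_lt_of_le hjk with heq | hlt
          · right
            constructor
            · rw [← heq]; exact aIncEnd_stop arr i
            · rw [hkdef]; exact aDecEnd_stop arr j
          · left
            have hstep := aDecEnd_step arr j (k - 1) (by omega) (by omega)
            rw [show k - 1 + 1 = k from by omega] at hstep
            rw [show k = (k - 1) + 1 from by omega]
            exact uF_zero_of_gt arr (k - 1)
              (by rw [show k - 1 + 1 = k from by omega]; exact hstep.2)
        rw [ih k _ (by omega) hinvk]
        -- the j-term of the sum
        have hufj : uF arr j = (j : Int) - (i : Int) := by
          have h := uF_run arr i hui (j - i) (by omega)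
          rw [show i + (j - i) = j from by omega] at h
          rw [h]
          omega
        have hdfj : dF arr j = (k : Int) - (j : Int) := by
          rw [dF_eq, hkdef]
        -- terms strictly between i and j vanish
        have hz1 : ∀ p, i ≤ p → p < i + (j - i) → uF arr p * dF arr p = 0 := by
          intro p hp1 hp2
          have hstep := aIncEnd_step arr i p hp1 (by omega)
          rw [dF, dif_neg (fun hc => absurd hc.2 (by omega))]
          ring
        -- terms strictly between j and k vanish
        have hz2 : ∀ p, j + 1 ≤ p → p < (j + 1) + (k - j - 1) → uF arr p * dF arr p = 0 := by
          intro p hp1 hp2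
          have hstep := aDecEnd_step arr j (p - 1) (by omega) (by omega)
          rw [show p - 1 + 1 = p from by omega] at hstep
          rw [show p = (p - 1) + 1 from by omega,
            uF_zero_of_gt arr (p - 1) (by rw [show p - 1 + 1 = p from by omega]; exact hstep.2)]
          ring
        have hseg : ((List.range' i (k - i)).map (fun p => uF arr p * dF arr p)).sum =
            if j < k then ((j : Int) - (i : Int)) * ((k : Int) - (j : Int)) else 0 := by
          rw [show List.range' i (k - i) = List.range' i (j - i) ++ List.range' j (k - j) from
            range'_split i j k hij hjk]
          rw [List.map_append, List.sum_append, sum_zero_of_all hz1, zero_add]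
          rcases Nat.eq_or_lt_of_le hjk with heq | hlt
          · rw [← heq]
            simp
          · rw [if_pos hlt,
              show k - j = (k - j - 1) + 1 from by omega, List.range'_succ,
              List.map_cons, List.sum_cons, sum_zero_of_all hz2, add_zero, hufj, hdfj]
        rw [show List.range' i (arr.length - i) =
              List.range' i (k - i) ++ List.range' k (arr.length - k) from
            range'_split i k arr.length (by omega) (by omega)]
        rw [List.map_append, List.sum_append, hseg]
        rcases Nat.eq_or_lt_of_le hjk with heq | hlt
        · rw [if_neg (by omega), if_neg (by omega)]
          ring
        · rw [if_pos hlt, if_pos hlt]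
          ring
    · rw [aLoop, dif_neg hi]
      rw [show arr.length - i = 0 from by omega]
      simp

theorem bUpsGo_spec (arr : List Int) (xs : List Int) : ∀ (i : Nat) (cur : Int) (acc : List Int) (prev : Int),
    arr.drop i = prev :: xs → cur = uF arr i →
    bUpsGo cur acc prev xs = acc.reverse ++ (List.range' (i + 1) xs.length).map (uF arr) := by
  induction xs with
  | nil => intro i cur acc prev _ _; simp [bUpsGo]
  | cons x rest ih =>
    intro i cur acc prev hd hc
    have hd1 : arr.drop (i + 1) = x :: rest := by
      have h : (arr.drop i).drop 1 = x :: rest := by rw [hd]; rfl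
      rwa [List.drop_drop] at h
    have hlen : i + 1 < arr.length := by
      have h := congrArg List.length hd1
      simp only [List.length_drop, List.length_cons] at h
      omega
    have hgi : arr.getD i 0 = prev := by
      have h : (arr.drop i).getD 0 0 = prev := by rw [hd]; rfl
      rwa [List.getD_eq_getElem?_getD, List.getElem?_drop, Nat.add_zero,
        ← List.getD_eq_getElem?_getD] at h
    have hgi1 : arr.getD (i + 1) 0 = x := by
      have h : (arr.drop (i + 1)).getD 0 0 = x := by rw [hd1]; rfl
      rwa [List.getD_eq_getElem?_getD, List.getElem?_drop, Nat.add_zero,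
        ← List.getD_eq_getElem?_getD] at h
    have hc' : (if prev < x then cur + 1 else 0) = uF arr (i + 1) := by
      simp only [uF, hgi, hgi1, hlen, true_and, ← hc]
    rw [show bUpsGo cur acc prev (x :: rest) =
          bUpsGo (if prev < x then cur + 1 else 0)
            ((if prev < x then cur + 1 else 0) :: acc) x rest from rfl]
    rw [ih (i + 1) _ _ x hd1 hc', List.reverse_cons, List.append_assoc, List.singleton_append,
      show (x :: rest).length = rest.length + 1 from rfl, List.range'_succ, List.map_cons, hc']

theorem bUps_eq (arr : List Int) : bUps arr = (List.range arr.length).map (uF arr) := by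
  cases arr with
  | nil => rfl
  | cons x xs =>
    rw [show bUps (x :: xs) = bUpsGo 0 [0] x xs from rfl,
      bUpsGo_spec (x :: xs) xs 0 0 [0] x rfl rfl,
      List.range_eq_range', List.length_cons, List.range'_succ, List.map_cons]
    rfl

theorem bDownGo_append (l : List Int) : ∀ (cur : Int) (acc : List Int) (nxt x : Int),
    cur = acc.headD 0 → acc ≠ [] →
    bDownGo cur acc nxt (l ++ [x]) =
      (if x > (nxt :: l).getLast (by simp) then (bDownGo cur acc nxt l).headD 0 + 1 else 0) ::
        bDownGo cur acc nxt l := by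
  induction l with
  | nil =>
    intro cur acc nxt x hcur hne
    simp [bDownGo, hcur]
  | cons z l' ih =>
    intro cur acc nxt x hcur hne
    rw [show (z :: l') ++ [x] = z :: (l' ++ [x]) from rfl]
    rw [show bDownGo cur acc nxt (z :: (l' ++ [x])) =
          bDownGo (if z > nxt then cur + 1 else 0)
            ((if z > nxt then cur + 1 else 0) :: acc) z (l' ++ [x]) from rfl]
    rw [ih (if z > nxt then cur + 1 else 0) ((if z > nxt then cur + 1 else 0) :: acc) z x rfl
      (by simp)]
    rw [show bDownGo cur acc nxt (z :: l') =
          bDownGo (if z > nxt then cur + 1 else 0)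
            ((if z > nxt then cur + 1 else 0) :: acc) z l' from rfl]
    congr 2

theorem dF_cons_succ (x : Int) (t : List Int) (p : Nat) : dF (x :: t) (p + 1) = dF t p := by
  fun_induction dF t p with
  | case1 p h ih =>
    rw [dF]
    rw [dif_pos (by simpa using h), ih]
  | case2 p h =>
    rw [dF]
    rw [dif_neg (by simpa using h)]

theorem bDown_cons (x y : Int) (xs : List Int) :
    bDown (x :: y :: xs) =
      (if x > y then (bDown (y :: xs)).headD 0 + 1 else 0) :: bDown (y :: xs) := by
  obtain ⟨w, ws, hws⟩ : ∃ w ws, (y :: xs).reverse = w :: ws := by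
    cases h : (y :: xs).reverse with
    | nil => exact absurd (congrArg List.length h) (by simp)
    | cons w ws => exact ⟨w, ws, rfl⟩
  have hrev : (x :: y :: xs).reverse = w :: (ws ++ [x]) := by
    rw [List.reverse_cons, hws]; rfl
  have hlast : (w :: ws).getLast (by simp) = y := by
    have h1 : (w :: ws).getLast? = some y := by
      rw [← hws, List.getLast?_reverse]; rfl
    have h2 := List.getLast?_eq_some_getLast (l := w :: ws) (by simp)
    rw [h2] at h1
    exact Option.some_injective _ h1
  rw [show bDown (x :: y :: xs) = bDownRev (x :: y :: xs).reverse from rfl, hrev,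
    show bDown (y :: xs) = bDownRev (y :: xs).reverse from rfl, hws,
    show bDownRev (w :: (ws ++ [x])) = bDownGo 0 [0] w (ws ++ [x]) from rfl,
    show bDownRev (w :: ws) = bDownGo 0 [0] w ws from rfl,
    bDownGo_append ws 0 [0] w x rfl (by simp), hlast]

theorem map_range'_shift (m : Nat) (x : Int) (u : List Int) :
    (List.range' 1 m).map (dF (x :: u)) = (List.range m).map (dF u) := by
  rw [List.range'_eq_map_range]
  rw [List.map_map]
  apply List.map_congr_left
  intro p _
  show dF (x :: u) (1 + p) = dF u p
  rw [Nat.add_comm, dF_cons_succ]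

theorem bDown_eq (arr : List Int) : bDown arr = (List.range arr.length).map (dF arr) := by
  induction arr with
  | nil => rfl
  | cons x xs ih =>
    cases xs with
    | nil =>
      rw [show bDown [x] = [0] from rfl]
      rw [show List.range [x].length = [0] from rfl]
      rw [List.map_cons, List.map_nil]
      rw [dF, dif_neg (by simp)]
    | cons y t =>
      rw [bDown_cons, ih]
      rw [show List.range (x :: y :: t).length = 0 :: List.range' 1 ((y :: t).length) from by
            rw [show (x :: y :: t).length = (y :: t).length + 1 from rfl,
              List.range_eq_range', List.range'_succ]]
      rw [List.map_cons, map_range'_shift ((y :: t).length) x (y :: t)]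
      congr 1
      rw [dF]
      have hhd : ((List.range (y :: t).length).map (dF (y :: t))).headD 0 = dF (y :: t) 0 := by
        rw [List.range_eq_range', List.length_cons, List.range'_succ, List.map_cons]
        rfl
      have hd1 : dF (x :: y :: t) 1 = dF (y :: t) 0 := dF_cons_succ x (y :: t) 0
      by_cases hxy : x > y
      · rw [dif_pos ⟨by simp, hxy⟩, if_pos hxy, hhd, hd1]
      · rw [if_neg hxy, dif_neg (fun hc => hxy hc.2)]

theorem zipWith_maps {α : Type} (f g : α → Int) (l : List α) :
    List.zipWith (· * ·) (l.map f) (l.map g) = l.map (fun x => f x * g x) := by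
  induction l with
  | nil => rfl
  | cons x xs ih => simp [ih]

-- ===== VERDICT (by name: the statement is the Claim_ definition above) =====
theorem num_hills_spec : Claim_equal_num_hills := by
  intro arr _
  unfold Spec_num_hills num_hills num_hills_alt
  rw [bUps_eq, bDown_eq, zipWith_maps]
  have h := main_loop arr arr.length 0 0 (by omega) (Or.inl rfl)
  rw [h]
  simp [List.range_eq_range']
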